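-- pv_equiv track=rewrite | github.com/udonuopn/picombo | picombo/pick.py | _get_formatted_text
-- ===== SOURCE A (Python) =====
-- def _get_formatted_text(item, keywords, selected=False):
--     tokens = []
--     last_idx = 0
--     item = str(item)
--     for keyword in keywords:
--         start_idx = item.lower().find(keyword.lower(), last_idx)
--         if start_idx >= 0:
--             end_idx = start_idx + len(keyword)
--             if selected:
--                 # 選択された行のスタイルを適用
--                 tokens.append(('class:selected-item', item[last_idx:start_idx]))  # マッチしてないテキスト
--                 tokens.append(('class:selected-item class:keyword', item[start_idx:end_idx]))  # マッチしたテキスト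
--             else:
--                 # 通常の行のスタイルを適用
--                 tokens.append(('', item[last_idx:start_idx]))  # マッチしてないテキスト
--                 tokens.append(('class:keyword', item[start_idx:end_idx]))  # マッチしたテキスト
--             last_idx = end_idx
--     tokens.append(('class:selected-item' if selected else '', item[last_idx:]))  # 残りのテキスト
--     return tokens
-- ===== SOURCE B (Python) =====
-- def _get_formatted_text(item, keywords, selected=False):
--     item = str(item)
--     low = item.lower()
--     spans = []
--     last = 0
--     for kw in keywords:
--         s = low.find(kw.lower(), last)
--         if s >= 0:
--             last = s + len(kw)
--             spans.append((s, last))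
--     plain = 'class:selected-item' if selected else ''
--     kwcls = 'class:selected-item class:keyword' if selected else 'class:keyword'
--     starts = [0] + [e for _, e in spans]
--     tokens = [tok
--               for (s, e), p in zip(spans, starts)
--               for tok in ((plain, item[p:s]), (kwcls, item[s:e]))]
--     tokens.append((plain, item[starts[-1]:]))
--     return tokens
-- ===== Notes on version B (the rewrite author's own statement) =====
-- stated objective: alternative
-- what changed: A builds the styled token list in one loop that interleaves matching and emission with mutable last_idx and recomputes item.lower() every iteration; B lowers the item once, collects the (start,end) match spans in one pass, then emits all tokens in a second pass by zipping the spans with their shifted ends, choosing the two style strings once.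
import Mathlib
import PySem

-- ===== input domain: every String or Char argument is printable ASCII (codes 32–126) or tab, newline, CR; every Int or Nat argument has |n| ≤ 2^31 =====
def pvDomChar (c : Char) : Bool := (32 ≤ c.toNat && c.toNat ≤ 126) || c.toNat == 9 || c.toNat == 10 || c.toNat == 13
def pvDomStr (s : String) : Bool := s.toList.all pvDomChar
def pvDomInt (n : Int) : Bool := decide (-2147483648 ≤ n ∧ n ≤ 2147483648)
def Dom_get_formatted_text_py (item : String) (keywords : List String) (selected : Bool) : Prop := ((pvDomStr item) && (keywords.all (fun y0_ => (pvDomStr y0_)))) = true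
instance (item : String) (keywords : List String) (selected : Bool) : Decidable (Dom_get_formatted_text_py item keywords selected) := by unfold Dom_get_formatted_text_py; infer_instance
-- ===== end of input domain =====

-- B replaces A's single token-building loop by two passes: first collect the (start, end)
-- match spans, then emit all tokens from the spans with the two style strings chosen once
-- (objective: alternative decomposition, same cost).

-- ===== PORT A =====
-- one iteration of A's 'for keyword in keywords' loop over state (tokens, last_idx)
def pvStepA (item : String) (selected : Bool) (st : List (String × String) × Int) (keyword : String) : List (String × String) × Int :=
  let start_idx := PySem.Str.findFrom (PySem.Str.lower item) (PySem.Str.lower keyword) st.2 none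
  if 0 ≤ start_idx then
    let end_idx := start_idx + PySem.Str.len keyword
    if selected then
      (st.1 ++ [("class:selected-item", PySem.Str.slice item (some st.2) (some start_idx)),
                ("class:selected-item class:keyword", PySem.Str.slice item (some start_idx) (some end_idx))], end_idx)
    else
      (st.1 ++ [("", PySem.Str.slice item (some st.2) (some start_idx)),
                ("class:keyword", PySem.Str.slice item (some start_idx) (some end_idx))], end_idx)
  else st

def get_formatted_text_py (item : String) (keywords : List String) (selected : Bool) : List (String × String) :=
  let r := keywords.foldl (pvStepA item selected) ([], 0)
  r.1 ++ [((if selected then "class:selected-item" else ""), PySem.Str.slice item (some r.2) none)]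

-- ===== PORT B =====
-- pass 1 of Source B: one iteration of the span-collecting loop over state (spans, last)
def pvSpanStep (low : String) (st : List (Int × Int) × Int) (kw : String) : List (Int × Int) × Int :=
  let s := PySem.Str.findFrom low (PySem.Str.lower kw) st.2 none
  if 0 ≤ s then (st.1 ++ [(s, s + PySem.Str.len kw)], s + PySem.Str.len kw) else st

def get_formatted_text_py_alt (item : String) (keywords : List String) (selected : Bool) : List (String × String) :=
  let spans := (keywords.foldl (pvSpanStep (PySem.Str.lower item)) ([], 0)).1
  let plain := if selected then "class:selected-item" else ""
  let kwcls := if selected then "class:selected-item class:keyword" else "class:keyword"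
  let starts : List Int := 0 :: spans.map Prod.snd
  let body := (spans.zip starts).flatMap (fun p =>
    [(plain, PySem.Str.slice item (some p.2) (some p.1.1)),
     (kwcls, PySem.Str.slice item (some p.1.1) (some p.1.2))])
  body ++ [(plain, PySem.Str.slice item (some (PySem.List.pyGetD starts (-1) 0)) none)]

-- ===== PRECONDITION & SPEC =====
def Spec_get_formatted_text_py (item : String) (keywords : List String) (selected : Bool) (out : List (String × String)) : Prop := out = get_formatted_text_py_alt item keywords selected
instance (item : String) (keywords : List String) (selected : Bool) (out : List (String × String)) : Decidable (Spec_get_formatted_text_py item keywords selected out) := by unfold Spec_get_formatted_text_py; infer_instance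

-- ===== CLAIM (what is proved, stated in full; the proofs are below) =====
def Claim_equal_get_formatted_text_py : Prop := ∀ (item : String) (keywords : List String) (selected : Bool), Dom_get_formatted_text_py item keywords selected → Spec_get_formatted_text_py item keywords selected (get_formatted_text_py item keywords selected)

-- ===== LEMMAS AND PROOFS =====

-- generic A-step with the two style class strings abstracted out
def pvStepG (item c0 c1 : String) (st : List (String × String) × Int) (keyword : String) : List (String × String) × Int :=
  let start_idx := PySem.Str.findFrom (PySem.Str.lower item) (PySem.Str.lower keyword) st.2 none
  if 0 ≤ start_idx then
    (st.1 ++ [(c0, PySem.Str.slice item (some st.2) (some start_idx)),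
              (c1, PySem.Str.slice item (some start_idx) (some (start_idx + PySem.Str.len keyword)))],
     start_idx + PySem.Str.len keyword)
  else st

theorem stepA_eq_stepG (item : String) (selected : Bool) :
    pvStepA item selected
      = pvStepG item (if selected then "class:selected-item" else "")
          (if selected then "class:selected-item class:keyword" else "class:keyword") := by
  funext st keyword
  cases selected <;> simp [pvStepA, pvStepG]

theorem pgd_neg_one {α : Type} (xs : List α) (d : α) :
    PySem.List.pyGetD xs (-1) d = xs.getLast?.getD d := by
  simp [PySem.List.pyGetD, PySem.List.pyGet?_neg_one]

-- the accumulated token list only grows by appending: pull the accumulator out of the folds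
theorem foldG_acc (item c0 c1 : String) (kws : List String) (acc : List (String × String)) (last : Int) :
    kws.foldl (pvStepG item c0 c1) (acc, last)
      = (acc ++ (kws.foldl (pvStepG item c0 c1) ([], last)).1,
         (kws.foldl (pvStepG item c0 c1) ([], last)).2) := by
  induction kws generalizing acc last with
  | nil => simp
  | cons k ks ih =>
    simp only [List.foldl_cons, pvStepG]
    split_ifs with h1
    · rw [ih (acc ++ _), ih ([] ++ _)]; simp
    · simpa using ih acc last

theorem foldS_acc (low : String) (kws : List String) (acc : List (Int × Int)) (last : Int) :
    kws.foldl (pvSpanStep low) (acc, last)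
      = (acc ++ (kws.foldl (pvSpanStep low) ([], last)).1,
         (kws.foldl (pvSpanStep low) ([], last)).2) := by
  induction kws generalizing acc last with
  | nil => simp
  | cons k ks ih =>
    simp only [List.foldl_cons, pvSpanStep]
    split_ifs with h1
    · rw [ih (acc ++ _), ih ([] ++ _)]; simp
    · simpa using ih acc last

-- main invariant: A's tokens-so-far plus the tail token equal B's rendering of the spans,
-- for any starting offset `last`
theorem main_inv (item c0 c1 : String) (kws : List String) (last : Int) :
    (kws.foldl (pvStepG item c0 c1) ([], last)).1
      ++ [(c0, PySem.Str.slice item (some (kws.foldl (pvStepG item c0 c1) ([], last)).2) none)]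
    = (((kws.foldl (pvSpanStep (PySem.Str.lower item)) ([], last)).1).zip
          (last :: ((kws.foldl (pvSpanStep (PySem.Str.lower item)) ([], last)).1).map Prod.snd)).flatMap
        (fun p =>
          [(c0, PySem.Str.slice item (some p.2) (some p.1.1)),
           (c1, PySem.Str.slice item (some p.1.1) (some p.1.2))])
      ++ [(c0, PySem.Str.slice item
             (some (PySem.List.pyGetD
               (last :: ((kws.foldl (pvSpanStep (PySem.Str.lower item)) ([], last)).1).map Prod.snd) (-1) 0)) none)] := by
  induction kws generalizing last with
  | nil => simp [pgd_neg_one]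
  | cons k ks ih =>
    simp only [List.foldl_cons, pvStepG, pvSpanStep]
    split_ifs with h1
    · rw [foldG_acc, foldS_acc]
      have hih := ih (PySem.Str.findFrom (PySem.Str.lower item) (PySem.Str.lower k) last none + PySem.Str.len k)
      simp only [List.nil_append, List.map_cons, List.cons_append,
        List.zip_cons_cons, List.flatMap_cons, pgd_neg_one,
        List.getLast?_cons_cons] at hih ⊢
      rw [hih]
    · exact ih last

-- ===== VERDICT (by name: the statement is the Claim_ definition above) =====
theorem get_formatted_text_py_spec : Claim_equal_get_formatted_text_py := by
  intro item keywords selected _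
  show get_formatted_text_py item keywords selected = get_formatted_text_py_alt item keywords selected
  rw [get_formatted_text_py, get_formatted_text_py_alt, stepA_eq_stepG]
  exact main_inv item _ _ keywords 0
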